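-- pv_equiv track=rewrite | github.com/prachin77/AAD | PRAC2/q2/app.py | calculate_pairs_recursion
-- ===== SOURCE A (Python) =====
-- def calculate_pairs_recursion(month, current=1):
--     if current > month:
--         return [], 0
--
--     formula = 2 ** current
--     results = [(current, formula)]
--
--     next_results, total_pairs = calculate_pairs_recursion(month, current + 1)
--
--     results.extend(next_results)
--
--     if current == month:
--         total_pairs += formula
--
--     return results, total_pairs
-- ===== SOURCE B (Python) =====
-- def calculate_pairs_recursion(month, current=1):
--     if current > month:
--         return [], 0
--     return [(i, 2 ** i) for i in range(current, month + 1)], 2 ** month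
-- ===== Notes on version B (the rewrite author's own statement) =====
-- stated objective: simpler
-- what changed: Replaces the linear recursion with a single range comprehension building the (i, 2**i) pairs and a closed-form total 2**month, with the same current>month base case.
-- outside the precondition, e.g. on calculate_pairs_recursion(1, -1): A returns ([(-1, 0.5), (0, 1), (1, 2)], 2), B returns ([(-1, 0.5), (0, 1), (1, 2)], 2)
import Mathlib
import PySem

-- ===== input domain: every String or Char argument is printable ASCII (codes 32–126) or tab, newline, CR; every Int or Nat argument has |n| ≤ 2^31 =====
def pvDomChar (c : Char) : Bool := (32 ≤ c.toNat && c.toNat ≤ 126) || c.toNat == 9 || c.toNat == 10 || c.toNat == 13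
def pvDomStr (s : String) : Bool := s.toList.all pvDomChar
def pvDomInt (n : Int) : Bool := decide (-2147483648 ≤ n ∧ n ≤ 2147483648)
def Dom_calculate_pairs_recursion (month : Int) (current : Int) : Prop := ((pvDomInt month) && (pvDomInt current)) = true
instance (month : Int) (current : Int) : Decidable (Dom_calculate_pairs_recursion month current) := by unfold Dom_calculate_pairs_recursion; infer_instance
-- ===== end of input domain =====

-- B replaces A's linear recursion with one range pass and a closed-form total (objective: simpler).

-- ===== PORT A =====
-- '2 ** current' is ported as 2 ^ current.toNat, exact for current ≥ 0 (Pre_ admits the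
-- recursive branch only there; for current < 0 Python produces floats, outside the type).
def calculate_pairs_recursion (month : Int) (current : Int) : (List (Int × Int)) × Int :=
  if current > month then ([], 0)
  else
    let formula : Int := 2 ^ current.toNat
    let results : List (Int × Int) := [(current, formula)]
    let r := calculate_pairs_recursion month (current + 1)
    let next_results := r.1
    let total_pairs := r.2
    let results := results ++ next_results
    let total_pairs := if current = month then total_pairs + formula else total_pairs
    (results, total_pairs)
termination_by (month - current + 1).toNat
decreasing_by omega


-- ===== PORT B =====
def calculate_pairs_recursion_alt (month : Int) (current : Int) : (List (Int × Int)) × Int :=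
  if current > month then ([], 0)
  else ((PySem.List.pyRange current (month + 1) 1).map (fun i => (i, 2 ^ i.toNat)), 2 ^ month.toNat)

-- ===== PRECONDITION & SPEC =====
-- Pre_ excludes (i) current ≤ month with current < 0, where Python A returns floats (not
-- values of the declared Int type), and (ii) current ≤ month with month - current > 900,
-- where Python A raises RecursionError (default recursion limit).
def Pre_calculate_pairs_recursion (month : Int) (current : Int) : Prop :=
  month < current ∨ (0 ≤ current ∧ month ≤ current + 900)
instance (month : Int) (current : Int) : Decidable (Pre_calculate_pairs_recursion month current) := by
  unfold Pre_calculate_pairs_recursion; infer_instance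

def pvWitness_calculate_pairs_recursion : Int × Int := (5, 1)

def Spec_calculate_pairs_recursion (month : Int) (current : Int) (out : (List (Int × Int)) × Int) : Prop := out = calculate_pairs_recursion_alt month current
instance (month : Int) (current : Int) (out : (List (Int × Int)) × Int) : Decidable (Spec_calculate_pairs_recursion month current out) := by unfold Spec_calculate_pairs_recursion; infer_instance

-- ===== CLAIM (what is proved, stated in full; the proofs are below) =====
def Claim_equal_calculate_pairs_recursion : Prop := ∀ (month : Int) (current : Int), Dom_calculate_pairs_recursion month current → Pre_calculate_pairs_recursion month current → Spec_calculate_pairs_recursion month current (calculate_pairs_recursion month current)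

-- ===== LEMMAS AND PROOFS =====

-- For 0 ≤ current ≤ month, A computes the pair list over current..month and the total 2^month.
theorem calc_pairs_rec_closed (month : Int) :
    ∀ (n : Nat) (current : Int), (month - current).toNat = n → 0 ≤ current → current ≤ month →
      calculate_pairs_recursion month current =
        ((PySem.List.pyRange current (month + 1) 1).map (fun i => (i, 2 ^ i.toNat)),
          2 ^ month.toNat) := by
  intro n
  induction n with
  | zero =>
      intro current hn h0 hle
      have hcm : current = month := by omega
      subst hcm
      rw [calculate_pairs_recursion, calculate_pairs_recursion]
      simp [PySem.List.pyRange_one_singleton]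
  | succ k ih =>
      intro current hn h0 hle
      have hlt : current < month := by omega
      rw [calculate_pairs_recursion]
      have hrec := ih (current + 1) (by omega) (by omega) (by omega)
      simp only [hrec]
      rw [PySem.List.pyRange_one_cons (by omega : current < month + 1)]
      rw [if_neg (by omega : ¬ current > month), if_neg (by omega : ¬ current = month)]
      simp

-- ===== VERDICT (by name: the statement is the Claim_ definition above) =====
theorem calculate_pairs_recursion_spec : Claim_equal_calculate_pairs_recursion := by
  intro month current _ hpre
  unfold Spec_calculate_pairs_recursion calculate_pairs_recursion_alt
  by_cases h : current > month
  · rw [calculate_pairs_recursion]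
    simp [h]
  · have hle : current ≤ month := by omega
    have h0 : 0 ≤ current := by
      rcases hpre with h' | h' <;> omega
    rw [calc_pairs_rec_closed month (month - current).toNat current rfl h0 hle]
    simp [h]
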